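-- pv_equiv track=rewrite | github.com/chris-henry-holland/python-ProjectEulerSolutions | src/project_euler_solutions/Project_Euler_Bonus.py | integerPlusSquareRootMultiplePower
-- ===== SOURCE A (Python) =====
-- from typing import (
--     List,
--     Tuple,
--     Optional,
-- )
--
-- def integerPlusSquareRootMultiplePower(a: int, b: int, c: int, exp: int, md: Optional[int]=None) -> Tuple[int]:
--     """
--     Calculates (a + b * sqrt(c)) ** exp in the form (n, m) where:
--         (a + b * sqrt(c)) ** exp = n + m * sqrt(c)
--     If md is not None, n and m are given modulo md.
--
--     Calculates using binary exponentiation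
--     """
--     if md is None:
--         curr = (a, b)
--         res = (1, 0)
--         e = exp
--         while True:
--             if e & 1:
--                 res = (res[0] * curr[0] + c * res[1] * curr[1], res[0] * curr[1] + res[1] * curr[0])
--             e >>= 1
--             if not e: break
--             curr = (curr[0] ** 2 + c * curr[1] ** 2, 2 * curr[0] * curr[1])
--         return res
--     curr = (a % md, b % md)
--     res = (1, 0)
--     e = exp
--     while True:
--         if e & 1:
--             res = ((res[0] * curr[0] + c * res[1] * curr[1]) % md, (res[0] * curr[1] + res[1] * curr[0]) % md)
--         e >>= 1
--         if not e: break
--         curr = ((pow(curr[0], 2, md) + c * pow(curr[1], 2, md)) % md, (2 * curr[0] * curr[1]) % md)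
--     return res
-- ===== SOURCE B (Python) =====
-- from typing import Optional, Tuple
--
-- def integerPlusSquareRootMultiplePower(a: int, b: int, c: int, exp: int, md: Optional[int]=None) -> Tuple[int]:
--     """(a + b*sqrt(c)) ** exp as (n, m) with n + m*sqrt(c); mod md if given.
--
--     Top-down divide-and-conquer exponentiation through one multiply helper."""
--     def mul(p, q):
--         n = p[0] * q[0] + c * p[1] * q[1]
--         m = p[0] * q[1] + p[1] * q[0]
--         return (n, m) if md is None else (n % md, m % md)
--
--     base = (a, b) if md is None else (a % md, b % md)
--
--     def power(e):
--         if e == 0: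
--             return (1, 0)
--         half = power(e >> 1)
--         sq = mul(half, half)
--         return mul(sq, base) if e & 1 else sq
--
--     return power(exp)
-- ===== Notes on version B (the rewrite author's own statement) =====
-- stated objective: simpler
-- what changed: Replaces A's duplicated iterative LSB-first loops (separate mod / no-mod copies) with a single top-down recursive square-and-multiply over one multiply helper that handles the optional modulus.
import Mathlib
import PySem

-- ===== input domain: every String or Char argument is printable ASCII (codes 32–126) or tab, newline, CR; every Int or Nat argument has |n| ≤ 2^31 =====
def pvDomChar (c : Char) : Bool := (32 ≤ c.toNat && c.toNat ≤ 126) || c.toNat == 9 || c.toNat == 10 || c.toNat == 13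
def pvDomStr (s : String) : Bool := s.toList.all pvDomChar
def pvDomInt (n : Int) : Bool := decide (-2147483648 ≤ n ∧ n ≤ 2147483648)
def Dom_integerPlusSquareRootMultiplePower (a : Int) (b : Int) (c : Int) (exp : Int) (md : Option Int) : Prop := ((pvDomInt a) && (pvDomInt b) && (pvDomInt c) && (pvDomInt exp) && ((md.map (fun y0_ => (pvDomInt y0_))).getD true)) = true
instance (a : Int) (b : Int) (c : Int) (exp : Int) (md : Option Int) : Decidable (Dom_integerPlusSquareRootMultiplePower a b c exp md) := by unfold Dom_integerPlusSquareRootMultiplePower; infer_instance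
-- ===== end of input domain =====

-- B replaces A's two duplicated iterative binary-exponentiation loops by one top-down
-- recursive square-and-multiply over a single multiply helper (objective: simpler).

-- ===== PORT A =====
-- A's no-mod while loop (do-while: use the low bit, halve, break when the halved exponent is 0).
-- The exponent runs on a Nat: for exp < 0 Python's loop never terminates, so nothing is claimed
-- there (Pre_ requires 0 ≤ exp) and the port is called with exp.toNat.
def pvLoopA (c : Int) (curr res : Int × Int) (e : Nat) : Int × Int :=
  let res' := if e &&& 1 = 1 then
      (res.1 * curr.1 + c * res.2 * curr.2, res.1 * curr.2 + res.2 * curr.1)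
    else res
  if _h : e >>> 1 = 0 then res'
  else pvLoopA c (curr.1 ^ 2 + c * curr.2 ^ 2, 2 * curr.1 * curr.2) res' (e >>> 1)
termination_by e
decreasing_by simp only [Nat.shiftRight_one] at *; omega

-- A's mod while loop; pow(x, 2, md) is PySem.Int.powMod x 2 md, % is PySem.Int.mod.
def pvLoopAm (c md : Int) (curr res : Int × Int) (e : Nat) : Int × Int :=
  let res' := if e &&& 1 = 1 then
      (PySem.Int.mod (res.1 * curr.1 + c * res.2 * curr.2) md,
       PySem.Int.mod (res.1 * curr.2 + res.2 * curr.1) md)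
    else res
  if _h : e >>> 1 = 0 then res'
  else pvLoopAm c md
    (PySem.Int.mod (PySem.Int.powMod curr.1 2 md + c * PySem.Int.powMod curr.2 2 md) md,
     PySem.Int.mod (2 * curr.1 * curr.2) md)
    res' (e >>> 1)
termination_by e
decreasing_by simp only [Nat.shiftRight_one] at *; omega

def integerPlusSquareRootMultiplePower (a : Int) (b : Int) (c : Int) (exp : Int) (md : Option Int) : Int × Int :=
  match md with
  | none => pvLoopA c (a, b) (1, 0) exp.toNat
  | some m => pvLoopAm c m (PySem.Int.mod a m, PySem.Int.mod b m) (1, 0) exp.toNat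

-- ===== PORT B =====
-- B's multiply helper: one multiplication in Z[sqrt c], reduced mod md when md is given.
def pvMulB (c : Int) (md : Option Int) (p q : Int × Int) : Int × Int :=
  let n := p.1 * q.1 + c * p.2 * q.2
  let m := p.1 * q.2 + p.2 * q.1
  match md with
  | none => (n, m)
  | some d => (PySem.Int.mod n d, PySem.Int.mod m d)

-- B's recursive power(e): top-down square-and-multiply (recurse on e >> 1, square, multiply by
-- the base when the low bit is set).  Nat exponent for the same reason as in port A.
def pvPowerB (c : Int) (md : Option Int) (base : Int × Int) (e : Nat) : Int × Int :=
  if _h : e = 0 then (1, 0)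
  else
    let half := pvPowerB c md base (e >>> 1)
    let sq := pvMulB c md half half
    if e &&& 1 = 1 then pvMulB c md sq base else sq
termination_by e
decreasing_by simp only [Nat.shiftRight_one]; omega

def integerPlusSquareRootMultiplePower_alt (a : Int) (b : Int) (c : Int) (exp : Int) (md : Option Int) : Int × Int :=
  let base := match md with
    | none => (a, b)
    | some d => (PySem.Int.mod a d, PySem.Int.mod b d)
  pvPowerB c md base exp.toNat

-- ===== PRECONDITION & SPEC =====
-- Pre_ excludes exp < 0 (A's loop never terminates: e >> 1 stalls at -1) and md = some 0
-- (ZeroDivisionError in A's '% md'); on both, B raises too (RecursionError / ZeroDivisionError).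
def Pre_integerPlusSquareRootMultiplePower (a : Int) (b : Int) (c : Int) (exp : Int) (md : Option Int) : Prop :=
  0 ≤ exp ∧ md ≠ some 0

instance (a : Int) (b : Int) (c : Int) (exp : Int) (md : Option Int) : Decidable (Pre_integerPlusSquareRootMultiplePower a b c exp md) := by unfold Pre_integerPlusSquareRootMultiplePower; infer_instance

def pvWitness_integerPlusSquareRootMultiplePower : Int × Int × Int × Int × Option Int := (2, 3, 5, 7, some 1000)

def Spec_integerPlusSquareRootMultiplePower (a : Int) (b : Int) (c : Int) (exp : Int) (md : Option Int) (out : Int × Int) : Prop := out = integerPlusSquareRootMultiplePower_alt a b c exp md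
instance (a : Int) (b : Int) (c : Int) (exp : Int) (md : Option Int) (out : Int × Int) : Decidable (Spec_integerPlusSquareRootMultiplePower a b c exp md out) := by unfold Spec_integerPlusSquareRootMultiplePower; infer_instance

-- ===== CLAIM (what is proved, stated in full; the proofs are below) =====
def Claim_equal_integerPlusSquareRootMultiplePower : Prop := ∀ (a : Int) (b : Int) (c : Int) (exp : Int) (md : Option Int), Dom_integerPlusSquareRootMultiplePower a b c exp md → Pre_integerPlusSquareRootMultiplePower a b c exp md → Spec_integerPlusSquareRootMultiplePower a b c exp md (integerPlusSquareRootMultiplePower a b c exp md)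

-- ===== LEMMAS AND PROOFS =====

-- Multiplication in Z[sqrt c] on coefficient pairs, and its powers (proof-side reference).
def pvPMul (c : Int) (p q : Int × Int) : Int × Int :=
  (p.1 * q.1 + c * p.2 * q.2, p.1 * q.2 + p.2 * q.1)

def pvPPow (c : Int) (p : Int × Int) : Nat → Int × Int
  | 0 => (1, 0)
  | n + 1 => pvPMul c (pvPPow c p n) p

-- componentwise Python-mod reduction, and componentwise congruence mod d
def pvRed (d : Int) (p : Int × Int) : Int × Int :=
  (PySem.Int.mod p.1 d, PySem.Int.mod p.2 d)

def pvCong (d : Int) (p q : Int × Int) : Prop :=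
  p.1 ≡ q.1 [ZMOD d] ∧ p.2 ≡ q.2 [ZMOD d]

theorem pvPMul_one (c : Int) (p : Int × Int) : pvPMul c p (1, 0) = p := by
  simp [pvPMul]

theorem pvOne_pmul (c : Int) (p : Int × Int) : pvPMul c (1, 0) p = p := by
  simp [pvPMul]

theorem pvPMul_comm (c : Int) (p q : Int × Int) : pvPMul c p q = pvPMul c q p := by
  simp only [pvPMul, Prod.mk.injEq]
  constructor <;> ring

theorem pvPMul_assoc (c : Int) (p q r : Int × Int) :
    pvPMul c (pvPMul c p q) r = pvPMul c p (pvPMul c q r) := by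
  simp only [pvPMul, Prod.mk.injEq]
  constructor <;> ring

-- r * (s * t) = (r * t) * s
theorem pvPMul_shuffle (c : Int) (r s t : Int × Int) :
    pvPMul c r (pvPMul c s t) = pvPMul c (pvPMul c r t) s := by
  rw [pvPMul_comm c s t, ← pvPMul_assoc]

theorem pvPPow_add (c : Int) (p : Int × Int) (m n : Nat) :
    pvPPow c p (m + n) = pvPMul c (pvPPow c p m) (pvPPow c p n) := by
  induction n with
  | zero => simp [pvPPow, pvPMul_one]
  | succ n ih =>
    show pvPMul c (pvPPow c p (m + n)) p = _
    rw [ih]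
    show _ = pvPMul c (pvPPow c p m) (pvPMul c (pvPPow c p n) p)
    rw [pvPMul_assoc]

theorem pvPPow_sq (c : Int) (p : Int × Int) (n : Nat) :
    pvPPow c (pvPMul c p p) n = pvPPow c p (2 * n) := by
  induction n with
  | zero => rfl
  | succ n ih =>
    show pvPMul c (pvPPow c (pvPMul c p p) n) (pvPMul c p p) = _
    rw [ih]
    have h2 : 2 * (n + 1) = 2 * n + 2 := by ring
    rw [h2, pvPPow_add]
    congr 1
    show pvPMul c p p = pvPMul c (pvPMul c (1, 0) p) p
    rw [pvOne_pmul]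

theorem pvMod_modeq (d a : Int) : PySem.Int.mod a d ≡ a [ZMOD d] := by
  have h := PySem.Int.floordiv_mul_add_mod a d
  rw [Int.modEq_iff_dvd]
  exact ⟨PySem.Int.floordiv a d, by linarith [mul_comm (PySem.Int.floordiv a d) d]⟩

theorem pvMod_congr {d : Int} (hd : d ≠ 0) {a b : Int} (h : a ≡ b [ZMOD d]) :
    PySem.Int.mod a d = PySem.Int.mod b d := by
  rcases lt_or_gt_of_ne hd with hneg | hpos
  · have b1 := PySem.Int.mod_neg_bounds a hneg
    have b2 := PySem.Int.mod_neg_bounds b hneg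
    have h1 : PySem.Int.mod a d ≡ PySem.Int.mod b d [ZMOD d] :=
      ((pvMod_modeq d a).trans h).trans (pvMod_modeq d b).symm
    rw [Int.modEq_iff_dvd] at h1
    obtain ⟨k, hk⟩ := h1
    have hk0 : k = 0 := by nlinarith
    rw [hk0, mul_zero] at hk
    omega
  · rw [PySem.Int.mod_eq_emod_of_pos hpos, PySem.Int.mod_eq_emod_of_pos hpos]
    exact h

theorem pvCong_refl (d : Int) (p : Int × Int) : pvCong d p p :=
  ⟨Int.ModEq.refl _, Int.ModEq.refl _⟩

theorem pvCong_trans {d : Int} {p q r : Int × Int} (h1 : pvCong d p q) (h2 : pvCong d q r) :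
    pvCong d p r :=
  ⟨h1.1.trans h2.1, h1.2.trans h2.2⟩

theorem pvRed_congr {d : Int} (hd : d ≠ 0) {p q : Int × Int} (h : pvCong d p q) :
    pvRed d p = pvRed d q := by
  simp only [pvRed, Prod.mk.injEq]
  exact ⟨pvMod_congr hd h.1, pvMod_congr hd h.2⟩

theorem pvCong_red (d : Int) (p : Int × Int) : pvCong d (pvRed d p) p :=
  ⟨pvMod_modeq d p.1, pvMod_modeq d p.2⟩

theorem pvCong_pmul (c : Int) {d : Int} {p p' q q' : Int × Int}
    (h1 : pvCong d p p') (h2 : pvCong d q q') :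
    pvCong d (pvPMul c p q) (pvPMul c p' q') :=
  ⟨(h1.1.mul h2.1).add (((Int.ModEq.refl c).mul h1.2).mul h2.2),
   (h1.1.mul h2.2).add (h1.2.mul h2.1)⟩

theorem pvCong_ppow (c : Int) {d : Int} {p q : Int × Int} (h : pvCong d p q) (n : Nat) :
    pvCong d (pvPPow c p n) (pvPPow c q n) := by
  induction n with
  | zero => exact pvCong_refl d (1, 0)
  | succ n ih => exact pvCong_pmul c ih h

theorem pvMulB_some (c d : Int) (p q : Int × Int) :
    pvMulB c (some d) p q = pvRed d (pvPMul c p q) := rfl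

theorem pvMulB_none (c : Int) (p q : Int × Int) :
    pvMulB c none p q = pvPMul c p q := rfl

-- bit split of a Nat exponent
theorem pvBitSplit (e : Nat) : e = 2 * (e >>> 1) + (e &&& 1) ∧ (e &&& 1 = 1 ∨ e &&& 1 = 0) := by
  rw [Nat.shiftRight_one, Nat.and_one_is_mod]
  omega

-- pvPPow peels one multiplication off the top
theorem pvPPow_succ (c : Int) (p : Int × Int) (n : Nat) :
    pvPMul c (pvPPow c p n) p = pvPPow c p (n + 1) := rfl

-- the square A computes is pvPMul curr curr
theorem pvSqA (c : Int) (p : Int × Int) :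
    (p.1 ^ 2 + c * p.2 ^ 2, 2 * p.1 * p.2) = pvPMul c p p := by
  simp only [pvPMul, Prod.mk.injEq]
  constructor <;> ring

-- A's mod square is congruent to pvPMul curr curr
theorem pvSqAm_cong (c : Int) {d : Int} (p : Int × Int) :
    pvCong d (PySem.Int.mod (PySem.Int.powMod p.1 2 d + c * PySem.Int.powMod p.2 2 d) d,
              PySem.Int.mod (2 * p.1 * p.2) d)
            (pvPMul c p p) := by
  constructor
  · show PySem.Int.mod (PySem.Int.mod (p.1 ^ 2) d + c * PySem.Int.mod (p.2 ^ 2) d) d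
        ≡ p.1 * p.1 + c * p.2 * p.2 [ZMOD d]
    have h1 : PySem.Int.mod (p.1 ^ 2) d + c * PySem.Int.mod (p.2 ^ 2) d
        ≡ p.1 ^ 2 + c * p.2 ^ 2 [ZMOD d] :=
      (pvMod_modeq d (p.1 ^ 2)).add ((Int.ModEq.refl c).mul (pvMod_modeq d (p.2 ^ 2)))
    have h2 : p.1 ^ 2 + c * p.2 ^ 2 = p.1 * p.1 + c * p.2 * p.2 := by ring
    exact ((pvMod_modeq d _).trans h1).trans (by rw [h2])
  · show PySem.Int.mod (2 * p.1 * p.2) d ≡ p.1 * p.2 + p.2 * p.1 [ZMOD d]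
    have h2 : 2 * p.1 * p.2 = p.1 * p.2 + p.2 * p.1 := by ring
    exact (pvMod_modeq d _).trans (by rw [h2])

-- ===== characterisation of B =====
theorem pvPowerB_none (c : Int) (base : Int × Int) (e : Nat) :
    pvPowerB c none base e = pvPPow c base e := by
  induction e using Nat.strong_induction_on with
  | _ e ih =>
    rw [pvPowerB]
    by_cases h0 : e = 0
    · simp [h0, pvPPow]
    · rw [dif_neg h0]
      have hlt : e >>> 1 < e := by rw [Nat.shiftRight_one]; omega
      obtain ⟨hsplit, hbit⟩ := pvBitSplit e
      rw [ih _ hlt]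
      by_cases hb : e &&& 1 = 1
      · rw [if_pos hb]
        simp only [pvMulB_none]
        rw [← pvPPow_add, pvPPow_succ]
        congr 1
        omega
      · rw [if_neg hb]
        simp only [pvMulB_none]
        rw [← pvPPow_add]
        congr 1
        omega

theorem pvPowerB_some (c : Int) {d : Int} (hd : d ≠ 0) (base : Int × Int) (e : Nat) (he : e ≠ 0) :
    pvPowerB c (some d) base e = pvRed d (pvPPow c base e) := by
  induction e using Nat.strong_induction_on with
  | _ e ih =>
    rw [pvPowerB, dif_neg he]
    obtain ⟨hsplit, hbit⟩ := pvBitSplit e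
    by_cases h0 : e >>> 1 = 0
    · -- then e = 1 (e ≠ 0 and e >> 1 = 0 imply the low bit is set)
      have he1 : e = 1 := by omega
      subst he1
      have hp0 : pvPowerB c (some d) base (1 >>> 1) = (1, 0) := by rw [pvPowerB]; rfl
      rw [hp0, if_pos (by omega : 1 &&& 1 = 1), pvMulB_some, pvMulB_some]
      have h11 : pvPMul c ((1 : Int), (0 : Int)) (1, 0) = (1, 0) := by rw [pvOne_pmul]
      rw [h11]
      apply pvRed_congr hd
      have h1 : pvPPow c base 1 = pvPMul c (1, 0) base := rfl
      rw [h1]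
      exact pvCong_pmul c (pvCong_red d (1, 0)) (pvCong_refl d base)
    · have hlt : e >>> 1 < e := by rw [Nat.shiftRight_one]; omega
      rw [ih _ hlt h0]
      have hsq : pvCong d
          (pvPMul c (pvRed d (pvPPow c base (e >>> 1))) (pvRed d (pvPPow c base (e >>> 1))))
          (pvPPow c base (e >>> 1 + e >>> 1)) := by
        rw [pvPPow_add]
        exact pvCong_pmul c (pvCong_red d _) (pvCong_red d _)
      by_cases hb : e &&& 1 = 1
      · rw [if_pos hb]
        simp only [pvMulB_some]
        have hco : pvCong d
            (pvPMul c (pvRed d (pvPMul c (pvRed d (pvPPow c base (e >>> 1))) (pvRed d (pvPPow c base (e >>> 1))))) base)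
            (pvPPow c base (e >>> 1 + e >>> 1 + 1)) := by
          rw [← pvPPow_succ]
          exact pvCong_pmul c (pvCong_trans (pvCong_red d _) hsq) (pvCong_refl d base)
        have hee : e >>> 1 + e >>> 1 + 1 = e := by omega
        rw [hee] at hco
        exact pvRed_congr hd hco
      · rw [if_neg hb]
        simp only [pvMulB_some]
        have hee : e >>> 1 + e >>> 1 = e := by omega
        rw [hee] at hsq
        exact pvRed_congr hd hsq

-- ===== characterisation of A =====
theorem pvLoopA_eq (c : Int) (e : Nat) (curr res : Int × Int) :
    pvLoopA c curr res e = pvPMul c res (pvPPow c curr e) := by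
  induction e using Nat.strong_induction_on generalizing curr res with
  | _ e ih =>
    rw [pvLoopA]
    obtain ⟨hsplit, hbit⟩ := pvBitSplit e
    by_cases h0 : e >>> 1 = 0
    · rw [dif_pos h0]
      by_cases hb : e &&& 1 = 1
      · have he1 : e = 1 := by omega
        subst he1
        rw [if_pos hb]
        have h1 : pvPPow c curr 1 = pvPMul c (1, 0) curr := rfl
        rw [h1, pvOne_pmul]
        rfl
      · have he0 : e = 0 := by omega
        subst he0
        rw [if_neg hb]
        show res = pvPMul c res (pvPPow c curr 0)
        rw [show pvPPow c curr 0 = ((1 : Int), (0 : Int)) from rfl, pvPMul_one]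
    · rw [dif_neg h0]
      have hlt : e >>> 1 < e := by rw [Nat.shiftRight_one]; omega
      rw [ih _ hlt, pvSqA, pvPPow_sq]
      by_cases hb : e &&& 1 = 1
      · rw [if_pos hb]
        show pvPMul c (pvPMul c res curr) (pvPPow c curr (2 * (e >>> 1)))
            = pvPMul c res (pvPPow c curr e)
        rw [← pvPMul_shuffle]
        congr 1
        rw [pvPPow_succ]
        congr 1
        omega
      · rw [if_neg hb]
        congr 2
        omega

theorem pvLoopAm_eq (c : Int) {d : Int} (hd : d ≠ 0) (e : Nat) (he : e ≠ 0) (curr res : Int × Int) :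
    pvLoopAm c d curr res e = pvRed d (pvPMul c res (pvPPow c curr e)) := by
  induction e using Nat.strong_induction_on generalizing curr res with
  | _ e ih =>
    rw [pvLoopAm]
    obtain ⟨hsplit, hbit⟩ := pvBitSplit e
    by_cases h0 : e >>> 1 = 0
    · -- e = 1: the low bit is set, one reduced multiplication, then break
      have he1 : e = 1 := by omega
      subst he1
      rw [dif_pos h0, if_pos (by omega : 1 &&& 1 = 1)]
      have h1 : pvPPow c curr 1 = pvPMul c (1, 0) curr := rfl
      rw [h1, pvOne_pmul]
      rfl
    · rw [dif_neg h0]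
      have hlt : e >>> 1 < e := by rw [Nat.shiftRight_one]; omega
      rw [ih _ hlt h0]
      have hcurr : pvCong d (pvPPow c
          (PySem.Int.mod (PySem.Int.powMod curr.1 2 d + c * PySem.Int.powMod curr.2 2 d) d,
           PySem.Int.mod (2 * curr.1 * curr.2) d) (e >>> 1))
          (pvPPow c curr (2 * (e >>> 1))) := by
        rw [← pvPPow_sq]
        exact pvCong_ppow c (pvSqAm_cong c curr) (e >>> 1)
      by_cases hb : e &&& 1 = 1
      · rw [if_pos hb]
        have hco : pvCong d
            (pvPMul c (pvRed d (pvPMul c res curr))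
              (pvPPow c
                (PySem.Int.mod (PySem.Int.powMod curr.1 2 d + c * PySem.Int.powMod curr.2 2 d) d,
                 PySem.Int.mod (2 * curr.1 * curr.2) d) (e >>> 1)))
            (pvPMul c res (pvPPow c curr (2 * (e >>> 1) + 1))) := by
          have halg : pvPMul c res (pvPPow c curr (2 * (e >>> 1) + 1))
              = pvPMul c (pvPMul c res curr) (pvPPow c curr (2 * (e >>> 1))) := by
            rw [← pvPPow_succ, pvPMul_shuffle]
          rw [halg]
          exact pvCong_pmul c (pvCong_red d (pvPMul c res curr)) hcurr
        have hee : 2 * (e >>> 1) + 1 = e := by omega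
        rw [hee] at hco
        exact pvRed_congr hd hco
      · rw [if_neg hb]
        have hco := pvCong_pmul c (pvCong_refl d res) hcurr
        have hee : 2 * (e >>> 1) = e := by omega
        rw [hee] at hco
        exact pvRed_congr hd hco

-- ===== VERDICT (by name: the statement is the Claim_ definition above) =====
theorem integerPlusSquareRootMultiplePower_spec : Claim_equal_integerPlusSquareRootMultiplePower := by
  intro a b c exp md _hdom hpre
  unfold Spec_integerPlusSquareRootMultiplePower
  obtain ⟨_hexp, hmd⟩ := hpre
  match md with
  | none =>
    show pvLoopA c (a, b) (1, 0) exp.toNat = integerPlusSquareRootMultiplePower_alt a b c exp none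
    rw [pvLoopA_eq, pvOne_pmul]
    show pvPPow c (a, b) exp.toNat = pvPowerB c none (a, b) exp.toNat
    rw [pvPowerB_none]
  | some d =>
    have hd : d ≠ 0 := fun h => hmd (by rw [h])
    show pvLoopAm c d (PySem.Int.mod a d, PySem.Int.mod b d) (1, 0) exp.toNat
        = pvPowerB c (some d) (PySem.Int.mod a d, PySem.Int.mod b d) exp.toNat
    by_cases h0 : exp.toNat = 0
    · rw [h0, pvLoopAm, pvPowerB]
      rfl
    · rw [pvLoopAm_eq c hd _ h0, pvPowerB_some c hd _ _ h0, pvOne_pmul]
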